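-- pv_equiv track=rewrite | github.com/meadowlark-bradsher/fca-store | src/fca_store/lattice.py | mask_to_ids
-- ===== SOURCE A (Python) =====
-- def mask_to_ids(mask: int, ids: list[str]) -> tuple[str, ...]:
--     values: list[str] = []
--     bitset = mask
--     while bitset:
--         low_bit = bitset & -bitset
--         idx = low_bit.bit_length() - 1
--         values.append(ids[idx])
--         bitset ^= low_bit
--     return tuple(values)
-- ===== SOURCE B (Python) =====
-- def mask_to_ids(mask: int, ids: list[str]) -> tuple[str, ...]:
--     return tuple(ids[i] for i in range(mask.bit_length()) if (mask >> i) & 1)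
-- ===== Notes on version B (the rewrite author's own statement) =====
-- stated objective: idiomatic
-- what changed: B replaces A's explicit while-loop that repeatedly extracts the lowest set bit with `x & -x` / xor-clearing by a single comprehension scanning every bit position 0..bit_length-1 and testing `(mask >> i) & 1`.
import Mathlib
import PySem

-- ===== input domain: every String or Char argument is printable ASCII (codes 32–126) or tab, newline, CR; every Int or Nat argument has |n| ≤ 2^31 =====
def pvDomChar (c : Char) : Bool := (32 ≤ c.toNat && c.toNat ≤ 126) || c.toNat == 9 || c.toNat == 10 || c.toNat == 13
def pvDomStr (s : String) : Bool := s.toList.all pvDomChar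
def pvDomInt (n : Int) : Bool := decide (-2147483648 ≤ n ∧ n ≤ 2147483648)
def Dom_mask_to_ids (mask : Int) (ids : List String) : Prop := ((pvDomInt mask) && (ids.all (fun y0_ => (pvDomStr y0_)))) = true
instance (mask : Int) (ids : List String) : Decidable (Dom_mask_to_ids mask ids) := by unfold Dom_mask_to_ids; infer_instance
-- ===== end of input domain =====

-- B replaces A's lowest-set-bit extraction loop (x & -x, xor-clear) by an idiomatic
-- scan of all bit positions 0..bit_length-1; equivalence is proved on non-negative
-- masks whose set bits all index into ids (exactly where A returns without raising).


-- ===== PORT A =====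
-- exact port of Python's int.bit_length (bit length of |i|)
def pyBitLength (i : Int) : Nat := if i.natAbs = 0 then 0 else Nat.log2 i.natAbs + 1

-- the `while bitset:` loop of A; fuel only makes the recursion total (inside Pre_
-- the loop runs at most mask.natAbs times, so the fuel is never exhausted)
def mask_to_ids_loop (ids : List String) (fuel : Nat) (bitset : Int) (values : List String) : List String :=
  match fuel with
  | 0 => values
  | fuel + 1 =>
    if bitset = 0 then values
    else
      let low_bit := Int.land bitset (-bitset)          -- bitset & -bitset
      let idx : Int := (pyBitLength low_bit : Int) - 1  -- low_bit.bit_length() - 1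
      let v := (PySem.List.pyGet? ids idx).getD ""      -- ids[idx]; IndexError excluded by Pre_
      mask_to_ids_loop ids fuel (Int.xor bitset low_bit) (values ++ [v])

def mask_to_ids (mask : Int) (ids : List String) : List String :=
  mask_to_ids_loop ids (mask.natAbs + 1) mask []

-- ===== PORT B =====
-- tuple(ids[i] for i in range(mask.bit_length()) if (mask >> i) & 1)
def mask_to_ids_alt (mask : Int) (ids : List String) : List String :=
  ((List.range (pyBitLength mask)).filter
      (fun i => Int.land (Int.shiftRight mask i) 1 == 1)).map
    (fun i => (PySem.List.pyGet? ids (i : Int)).getD "")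

-- ===== PRECONDITION & SPEC =====
-- Pre_ holds exactly where Python A returns: a negative mask makes A's loop raise
-- IndexError eventually, and a set bit at position ≥ len(ids) raises IndexError.
def Pre_mask_to_ids (mask : Int) (ids : List String) : Prop :=
  0 ≤ mask ∧ mask < 2 ^ ids.length
instance (mask : Int) (ids : List String) : Decidable (Pre_mask_to_ids mask ids) := by unfold Pre_mask_to_ids; infer_instance

def pvWitness_mask_to_ids : Int × List String := (5, ["a", "b", "c"])

def Spec_mask_to_ids (mask : Int) (ids : List String) (out : List String) : Prop := out = mask_to_ids_alt mask ids
instance (mask : Int) (ids : List String) (out : List String) : Decidable (Spec_mask_to_ids mask ids out) := by unfold Spec_mask_to_ids; infer_instance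

-- ===== CLAIM (what is proved, stated in full; the proofs are below) =====
def Claim_equal_mask_to_ids : Prop := ∀ (mask : Int) (ids : List String), Dom_mask_to_ids mask ids → Pre_mask_to_ids mask ids → Spec_mask_to_ids mask ids (mask_to_ids mask ids)

-- ===== LEMMAS AND PROOFS =====

-- the increasing list of set-bit positions of n, by parity recursion
def posList (n : Nat) : List Nat :=
  if h : n = 0 then []
  else if n % 2 = 1 then 0 :: (posList (n / 2)).map (· + 1)
  else (posList (n / 2)).map (· + 1)
  termination_by n
  decreasing_by all_goals omega

theorem ldiff_odd {n : Nat} (h : n % 2 = 1) : Nat.ldiff n (n - 1) = 1 := by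
  apply Nat.eq_of_testBit_eq
  intro i
  cases i with
  | zero =>
    have h0 : (n - 1) % 2 = 0 := by omega
    rw [Nat.testBit_ldiff]
    simp [Nat.testBit_zero, h, h0]
  | succ i =>
    have h2 : (n - 1) / 2 = n / 2 := by omega
    rw [Nat.testBit_ldiff]
    simp [Nat.testBit_add_one, h2]

theorem xor_odd {n : Nat} (h : n % 2 = 1) : n ^^^ 1 = n - 1 := by
  apply Nat.eq_of_testBit_eq
  intro i
  cases i with
  | zero =>
    have h0 : (n - 1) % 2 = 0 := by omega
    rw [Nat.testBit_xor]
    simp [Nat.testBit_zero, h, h0]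
  | succ i =>
    have h2 : (n - 1) / 2 = n / 2 := by omega
    rw [Nat.testBit_xor]
    simp [Nat.testBit_add_one, h2]

theorem ldiff_even {n : Nat} (h : n % 2 = 0) (h0 : 0 < n) :
    Nat.ldiff n (n - 1) = 2 * Nat.ldiff (n / 2) (n / 2 - 1) := by
  apply Nat.eq_of_testBit_eq
  intro i
  cases i with
  | zero =>
    have h1 : (n - 1) % 2 = 1 := by omega
    have h2 : (2 * Nat.ldiff (n / 2) (n / 2 - 1)) % 2 = 0 := by omega
    rw [Nat.testBit_ldiff]
    simp [Nat.testBit_zero, h, h1, h2]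
  | succ i =>
    have h1 : (n - 1) / 2 = n / 2 - 1 := by omega
    have h2 : (2 * Nat.ldiff (n / 2) (n / 2 - 1)) / 2 = Nat.ldiff (n / 2) (n / 2 - 1) := by omega
    rw [Nat.testBit_ldiff]
    simp only [Nat.testBit_add_one, h1, h2, Nat.testBit_ldiff]

theorem xor_even {n l : Nat} (h : n % 2 = 0) :
    n ^^^ (2 * l) = 2 * ((n / 2) ^^^ l) := by
  apply Nat.eq_of_testBit_eq
  intro i
  cases i with
  | zero =>
    have h1 : (2 * l) % 2 = 0 := by omega
    have h2 : (2 * ((n / 2) ^^^ l)) % 2 = 0 := by omega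
    rw [Nat.testBit_xor]
    simp [Nat.testBit_zero, h, h1, h2]
  | succ i =>
    have h1 : (2 * l) / 2 = l := by omega
    have h2 : (2 * ((n / 2) ^^^ l)) / 2 = (n / 2) ^^^ l := by omega
    rw [Nat.testBit_xor]
    simp only [Nat.testBit_add_one, h1, h2, Nat.testBit_xor]

theorem log2_two_mul {x : Nat} (h : 0 < x) : Nat.log2 (2 * x) = Nat.log2 x + 1 := by
  rw [Nat.log2_eq_log_two, Nat.log2_eq_log_two, mul_comm, Nat.log_mul_base one_lt_two (by omega)]

theorem posList_two_mul (x : Nat) : posList (2 * x) = (posList x).map (· + 1) := by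
  rcases Nat.eq_zero_or_pos x with rfl | hx
  · simp [posList]
  · rw [posList]
    have h1 : ¬ (2 * x = 0) := by omega
    have h2 : ¬ ((2 * x) % 2 = 1) := by omega
    have h3 : 2 * x / 2 = x := by omega
    simp only [h1, h2, h3, dite_eq_ite, if_false]

theorem lowbit_spec (n : Nat) (h : 0 < n) :
    0 < Nat.ldiff n (n - 1) ∧ n ^^^ Nat.ldiff n (n - 1) < n ∧
      posList n = Nat.log2 (Nat.ldiff n (n - 1)) :: posList (n ^^^ Nat.ldiff n (n - 1)) := by
  induction n using Nat.strong_induction_on with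
  | _ n ih =>
    rcases Nat.even_or_odd n with he | ho
    · -- n even, n > 0
      have hmod : n % 2 = 0 := Nat.even_iff.mp he
      have hm : 0 < n / 2 := by omega
      obtain ⟨hl', hlt', heq'⟩ := ih (n / 2) (by omega) hm
      have hld := ldiff_even hmod h
      refine ⟨by omega, ?_, ?_⟩
      · rw [hld, xor_even hmod]; omega
      · rw [hld, xor_even hmod, log2_two_mul hl', posList_two_mul]
        calc posList n = posList (2 * (n / 2)) := by congr 1; omega
          _ = (posList (n / 2)).map (· + 1) := posList_two_mul _
          _ = (Nat.log2 (Nat.ldiff (n / 2) (n / 2 - 1)) :: posList (n / 2 ^^^ Nat.ldiff (n / 2) (n / 2 - 1))).map (· + 1) := by rw [heq']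
          _ = _ := by simp
    · -- n odd
      have hmod : n % 2 = 1 := Nat.odd_iff.mp ho
      have hld := ldiff_odd hmod
      refine ⟨by omega, ?_, ?_⟩
      · rw [hld, xor_odd hmod]; omega
      · rw [hld, xor_odd hmod]
        have hlog : Nat.log2 1 = 0 := by decide
        rw [hlog, posList]
        have hn : ¬ (n = 0) := by omega
        have hsub : n - 1 = 2 * (n / 2) := by omega
        simp only [hn, hmod, dite_eq_ite, if_false, if_true, hsub, posList_two_mul]

-- natural-level bit length
theorem pyBitLength_ofNat (n : Nat) :
    pyBitLength (Int.ofNat n) = if n = 0 then 0 else Nat.log2 n + 1 := by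
  simp [pyBitLength]

theorem bitLen_succ {n : Nat} (h : 0 < n) :
    (if n = 0 then 0 else Nat.log2 n + 1) =
      (if n / 2 = 0 then 0 else Nat.log2 (n / 2) + 1) + 1 := by
  rcases Nat.lt_or_ge n 2 with h1 | h2
  · interval_cases n <;> decide
  · have hhalf : ¬ (n / 2 = 0) := by omega
    have hp : 0 < Nat.log 2 n := Nat.log_pos one_lt_two h2
    have : Nat.log2 n = Nat.log2 (n / 2) + 1 := by
      rw [Nat.log2_eq_log_two, Nat.log2_eq_log_two, Nat.log_div_base]; omega
    simp [hhalf, this]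
    omega

-- A's loop produces the gets of posList
theorem loopA (ids : List String) (fuel n : Nat) (acc : List String) (hf : n ≤ fuel) :
    mask_to_ids_loop ids fuel (Int.ofNat n) acc
      = acc ++ (posList n).map (fun i => (PySem.List.pyGet? ids (i : Int)).getD "") := by
  induction fuel generalizing n acc with
  | zero =>
    have : n = 0 := by omega
    subst this
    simp [mask_to_ids_loop, posList]
  | succ fuel ih =>
    rcases Nat.eq_zero_or_pos n with rfl | hn
    · simp [mask_to_ids_loop, posList]
    · obtain ⟨hl, hlt, heq⟩ := lowbit_spec n hn
      set l := Nat.ldiff n (n - 1) with hldef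
      rw [mask_to_ids_loop]
      have hne : ¬ (Int.ofNat n = 0) := by
        simp [Int.ofNat_eq_zero]; omega
      rw [if_neg hne]
      have hneg : -(Int.ofNat n) = Int.negSucc (n - 1) := by
        have hn1 : n = (n - 1) + 1 := by omega
        rw [hn1]; rfl
      have hland : Int.land (Int.ofNat n) (-(Int.ofNat n)) = Int.ofNat l := by
        rw [hneg]; rfl
      have hbl : pyBitLength (Int.ofNat l) = Nat.log2 l + 1 := by
        rw [pyBitLength_ofNat, if_neg (by omega)]
      have hidx : ((pyBitLength (Int.ofNat l) : Nat) : Int) - 1 = ((Nat.log2 l : Nat) : Int) := by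
        rw [hbl]; push_cast; ring
      have hxor : Int.xor (Int.ofNat n) (Int.ofNat l) = Int.ofNat (n ^^^ l) := rfl
      simp only [hland, hidx, hxor]
      rw [ih (n ^^^ l) _ (by omega)]
      rw [heq]
      simp

-- the Boolean test of B port is testBit
theorem testB (n i : Nat) :
    (Int.land (Int.shiftRight (Int.ofNat n) i) 1 == 1) = n.testBit i := by
  have h1 : Int.shiftRight (Int.ofNat n) i = Int.ofNat (n >>> i) := rfl
  have h2 : Int.land (Int.ofNat (n >>> i)) 1 = Int.ofNat ((n >>> i) &&& 1) := rfl
  rw [h1, h2]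
  rw [← Nat.decide_shiftRight_mod_two_eq_one, Nat.and_one_is_mod]
  rcases Nat.mod_two_eq_zero_or_one (n >>> i) with h | h <;> simp [h]  -- two cases

-- B's filtered range is posList
theorem filterRange (n : Nat) :
    (List.range (if n = 0 then 0 else Nat.log2 n + 1)).filter (fun i => n.testBit i) = posList n := by
  induction n using Nat.strong_induction_on with
  | _ n ih =>
    rcases Nat.eq_zero_or_pos n with rfl | hn
    · simp [posList]
    · rw [bitLen_succ hn, List.range_succ_eq_map]
      rw [List.filter_cons]
      rw [List.filter_map]
      have hcomp : ((fun i => n.testBit i) ∘ Nat.succ) = fun i => (n / 2).testBit i := by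
        funext i; simp [Nat.testBit_add_one]
      rw [hcomp, ih (n / 2) (by omega)]
      conv_rhs => rw [posList]
      have hne : ¬ (n = 0) := by omega
      rcases Nat.mod_two_eq_zero_or_one n with hmod | hmod
      · have ht : n.testBit 0 = false := by simp [Nat.testBit_zero, hmod]
        simp [hne, hmod, ht]
      · have ht : n.testBit 0 = true := by simp [Nat.testBit_zero, hmod]
        simp [hne, hmod, ht]

theorem altChar (n : Nat) (ids : List String) :
    mask_to_ids_alt (Int.ofNat n) ids
      = (posList n).map (fun i => (PySem.List.pyGet? ids (i : Int)).getD "") := by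
  unfold mask_to_ids_alt
  rw [pyBitLength_ofNat]
  rw [List.filter_congr (fun i _ => testB n i)]
  rw [filterRange n]

-- ===== VERDICT (by name: the statement is the Claim_ definition above) =====
theorem mask_to_ids_spec : Claim_equal_mask_to_ids := by
  intro mask ids _ hpre
  obtain ⟨n, rfl⟩ := Int.eq_ofNat_of_zero_le hpre.1
  unfold Spec_mask_to_ids mask_to_ids
  have hofnat : ((n : Int)) = Int.ofNat n := rfl
  rw [hofnat]
  rw [altChar]
  have hfuel : n ≤ (Int.ofNat n).natAbs + 1 := by simp
  rw [loopA ids _ n [] hfuel]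
  simp
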